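-- pv_equiv track=rewrite | github.com/clover3/Chair | src/tlm/qtype/partial_relevance/result_print/paired_ttest.py | count_high_low_win
-- ===== SOURCE A (Python) =====
-- def count_high_low_win(scores1, scores2):
--     high_win = 0
--     low_win = 0
--     for s1, s2 in zip(scores1, scores2):
--         if s1 > s2:
--             high_win += 1
--         elif s2 > s1:
--             low_win += 1
--
--     return high_win, low_win
-- ===== SOURCE B (Python) =====
-- def count_high_low_win(scores1, scores2):
--     pairs = list(zip(scores1, scores2))
--
--     def go(lo, hi):
--         # divide and conquer over pairs[lo:hi]
--         if hi - lo == 0: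
--             return 0, 0
--         if hi - lo == 1:
--             s1, s2 = pairs[lo]
--             if s1 > s2:
--                 return 1, 0
--             if s2 > s1:
--                 return 0, 1
--             return 0, 0
--         mid = (lo + hi) // 2
--         h1, l1 = go(lo, mid)
--         h2, l2 = go(mid, hi)
--         return h1 + h2, l1 + l2
--
--     return go(0, len(pairs))
-- ===== Notes on version B (the rewrite author's own statement) =====
-- stated objective: alternative
-- what changed: Replaced the single linear fold carrying two counters with a divide-and-conquer recursion that splits the zipped pairs in half, counts each half recursively, and adds the two partial (high, low) results.
import Mathlib
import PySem

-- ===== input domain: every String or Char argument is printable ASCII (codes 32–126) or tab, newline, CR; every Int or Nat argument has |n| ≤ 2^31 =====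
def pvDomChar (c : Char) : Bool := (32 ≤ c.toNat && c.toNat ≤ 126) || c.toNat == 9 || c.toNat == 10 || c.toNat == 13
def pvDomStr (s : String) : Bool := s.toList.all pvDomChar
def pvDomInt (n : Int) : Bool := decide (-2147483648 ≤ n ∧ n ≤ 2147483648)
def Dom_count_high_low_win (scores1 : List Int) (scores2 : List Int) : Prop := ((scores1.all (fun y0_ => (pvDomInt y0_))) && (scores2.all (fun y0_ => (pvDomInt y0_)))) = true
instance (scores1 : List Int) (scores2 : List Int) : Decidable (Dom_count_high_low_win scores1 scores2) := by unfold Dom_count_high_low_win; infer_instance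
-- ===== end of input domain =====

-- B replaces A's single fused counting loop by a divide-and-conquer recursion over the zipped pairs (alternative decomposition, same cost).


-- ===== PORT A =====
-- single pass over zip with two accumulators, as A's loop
def count_high_low_win (scores1 : List Int) (scores2 : List Int) : Int × Int :=
  (List.zip scores1 scores2).foldl
    (fun (acc : Int × Int) p =>
      if p.1 > p.2 then (acc.1 + 1, acc.2)
      else if p.2 > p.1 then (acc.1, acc.2 + 1)
      else acc)
    (0, 0)

-- ===== PORT B =====
-- B's helper go(lo, hi): divide and conquer over pairs[lo:hi]
def chlwGo (pairs : List (Int × Int)) (lo hi : Nat) : Int × Int :=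
  if hi - lo = 0 then (0, 0)
  else if hi - lo = 1 then
    -- pairs[lo]; all calls keep lo in range
    let p := pairs.getD lo (0, 0)
    if p.1 > p.2 then (1, 0)
    else if p.2 > p.1 then (0, 1)
    else (0, 0)
  else
    let mid := (lo + hi) / 2
    let r1 := chlwGo pairs lo mid
    let r2 := chlwGo pairs mid hi
    (r1.1 + r2.1, r1.2 + r2.2)
termination_by hi - lo
decreasing_by
  · omega
  · omega

def count_high_low_win_alt (scores1 : List Int) (scores2 : List Int) : Int × Int :=
  let pairs := List.zip scores1 scores2
  chlwGo pairs 0 pairs.length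

-- ===== PRECONDITION & SPEC =====
def Spec_count_high_low_win (scores1 : List Int) (scores2 : List Int) (out : Int × Int) : Prop := out = count_high_low_win_alt scores1 scores2
instance (scores1 : List Int) (scores2 : List Int) (out : Int × Int) : Decidable (Spec_count_high_low_win scores1 scores2 out) := by unfold Spec_count_high_low_win; infer_instance

-- ===== CLAIM (what is proved, stated in full; the proofs are below) =====
def Claim_equal_count_high_low_win : Prop := ∀ (scores1 : List Int) (scores2 : List Int), Dom_count_high_low_win scores1 scores2 → Spec_count_high_low_win scores1 scores2 (count_high_low_win scores1 scores2)

-- ===== LEMMAS AND PROOFS =====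

-- the (high, low) counts over a list of pairs
def chlwCnt (l : List (Int × Int)) : Int × Int :=
  (((l.filter (fun p => p.1 > p.2)).length : Int),
   ((l.filter (fun p => p.2 > p.1)).length : Int))

lemma chlw_fold (l : List (Int × Int)) (a b : Int) :
    l.foldl
      (fun (acc : Int × Int) p =>
        if p.1 > p.2 then (acc.1 + 1, acc.2)
        else if p.2 > p.1 then (acc.1, acc.2 + 1)
        else acc)
      (a, b)
    = (a + (chlwCnt l).1, b + (chlwCnt l).2) := by
  induction l generalizing a b with
  | nil => simp [chlwCnt]
  | cons h t ih =>
    simp only [List.foldl, chlwCnt, List.filter_cons]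
    rcases lt_trichotomy h.2 h.1 with h1 | h1 | h1
    · simp [ih, chlwCnt, h1, asymm h1]; omega
    · simp [ih, chlwCnt, h1]
    · simp [ih, chlwCnt, h1, asymm h1]; omega

lemma chlwCnt_append (l₁ l₂ : List (Int × Int)) :
    chlwCnt (l₁ ++ l₂) = ((chlwCnt l₁).1 + (chlwCnt l₂).1, (chlwCnt l₁).2 + (chlwCnt l₂).2) := by
  simp [chlwCnt]

lemma chlwGo_eq (k : Nat) : ∀ (pairs : List (Int × Int)) (lo hi : Nat), hi - lo = k →
    hi ≤ pairs.length →
    chlwGo pairs lo hi = chlwCnt ((pairs.drop lo).take (hi - lo)) := by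
  induction k using Nat.strong_induction_on with
  | _ k ih =>
    intro pairs lo hi hk h
    rw [chlwGo]
    split_ifs with h0 h1
    · simp [h0, chlwCnt]
    · have hlo : lo < pairs.length := by omega
      rw [List.drop_eq_getElem_cons hlo]
      simp only [h1, List.take_succ_cons, List.take_zero]
      rw [List.getD_eq_getElem pairs (0, 0) hlo]
      rcases lt_trichotomy pairs[lo].2 pairs[lo].1 with h2 | h2 | h2
      · simp [chlwCnt, h2, asymm h2]
      · simp [chlwCnt, h2]
      · simp [chlwCnt, h2, asymm h2]
    · have hmid1 : (lo + hi) / 2 ≤ pairs.length := by omega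
      dsimp only
      rw [ih ((lo + hi) / 2 - lo) (by omega) pairs lo ((lo + hi) / 2) rfl hmid1,
          ih (hi - (lo + hi) / 2) (by omega) pairs ((lo + hi) / 2) hi rfl h]
      have hsplit : (pairs.drop lo).take (hi - lo)
          = (pairs.drop lo).take ((lo + hi) / 2 - lo)
            ++ ((pairs.drop lo).drop ((lo + hi) / 2 - lo)).take (hi - (lo + hi) / 2) := by
        rw [← List.take_add]
        congr 1
        omega
      have harith : lo + ((lo + hi) / 2 - lo) = (lo + hi) / 2 := by omega
      rw [hsplit, List.drop_drop, chlwCnt_append, harith]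

-- ===== VERDICT (by name: the statement is the Claim_ definition above) =====
theorem count_high_low_win_spec : Claim_equal_count_high_low_win := by
  intro s1 s2 _
  unfold Spec_count_high_low_win count_high_low_win count_high_low_win_alt
  rw [chlw_fold, chlwGo_eq _ _ 0 _ rfl (le_refl _), List.drop_zero, Nat.sub_zero,
      List.take_length]
  simp
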